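-- pv_equiv track=rewrite | github.com/lex00/wetwire-aws-python | src/wetwire_aws/naming.py | _replace_hyphens
-- ===== SOURCE A (Python) =====
-- def _replace_hyphens(name: str) -> str:
--     """Replace hyphens with meaningful alternatives.
--
--     - Leading hyphen followed by digit: Neg (e.g., -1 -> Neg1)
--     - Hyphen between letters: remove and capitalize next letter (kebab-case -> camelCase)
--     - Other hyphens: underscore
--
--     Examples:
--         Port-1ICMP -> PortNeg1ICMP
--         my-resource -> MyResource (when used with to_pascal_case)
--         test-name -> test_name (for snake_case contexts)
--     """
--     if not name or "-" not in name:
--         return name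
--
--     result = []
--     i = 0
--     while i < len(name):
--         char = name[i]
--         if char == "-":
--             # Check what follows the hyphen
--             if i + 1 < len(name):
--                 next_char = name[i + 1]
--                 if next_char.isdigit():
--                     # -1 -> Neg1
--                     result.append("Neg")
--                 elif next_char.isalpha():
--                     # my-resource -> myResource (capitalize next letter)
--                     result.append(next_char.upper())
--                     i += 1  # Skip the next char since we already added it
--                 else:
--                     result.append("_")
--             else:
--                 # Trailing hyphen
--                 result.append("_")
--         else:
--             result.append(char)
--         i += 1
--
--     return "".join(result)
-- ===== SOURCE B (Python) =====
-- def _replace_hyphens(name: str) -> str: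
--     parts = name.split("-")
--     out = [parts[0]]
--     for p in parts[1:]:
--         if p and p[0].isdigit():
--             out.append("Neg" + p)
--         elif p and p[0].isalpha():
--             out.append(p[0].upper() + p[1:])
--         else:
--             out.append("_" + p)
--     return "".join(out)
-- ===== Notes on version B (the rewrite author's own statement) =====
-- stated objective: idiomatic
-- what changed: Replaces the manual index loop with its i+=1 lookahead skip by splitting the string on the hyphen once and classifying each following segment by its first character, then joining.
import Mathlib
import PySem

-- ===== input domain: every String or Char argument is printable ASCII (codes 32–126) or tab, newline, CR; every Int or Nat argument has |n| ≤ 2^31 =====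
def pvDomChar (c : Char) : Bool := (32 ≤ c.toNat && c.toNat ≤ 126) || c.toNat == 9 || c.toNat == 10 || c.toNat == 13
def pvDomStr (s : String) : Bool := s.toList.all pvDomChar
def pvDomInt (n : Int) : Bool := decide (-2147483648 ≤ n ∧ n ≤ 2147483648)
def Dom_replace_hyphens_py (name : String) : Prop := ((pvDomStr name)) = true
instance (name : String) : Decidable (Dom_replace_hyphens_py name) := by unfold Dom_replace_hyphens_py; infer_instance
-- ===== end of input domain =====

-- B replaces A's index loop (with its i+=1 lookahead skip) by one split on the hyphen + per-segment classification + join; idiomatic, same cost.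

-- ===== PORT A =====
-- A's while loop over index i, as structural recursion on the suffix name[i:]; produces the list of appended pieces (A's `result`)
def pyAGo : List Char → List (List Char)
  | [] => []
  | c :: rest =>
    if c = '-' then
      match rest with
      | [] => ['_'] :: pyAGo []                                                   -- trailing hyphen
      | n :: rest' =>
        if PySem.Chars.isdigit n then ['N', 'e', 'g'] :: pyAGo (n :: rest')       -- -1 -> Neg1
        else if PySem.Chars.isalpha n then PySem.Chars.upper [n] :: pyAGo rest'   -- capitalize, skip next char
        else ['_'] :: pyAGo (n :: rest')
    else [c] :: pyAGo rest
termination_by l => l.length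

def replace_hyphens_py (name : String) : String :=
  if name = "" ∨ PySem.Str.isIn "-" name = false then name
  else String.ofList (PySem.Chars.join [] (pyAGo name.toList))

-- ===== PORT B =====
-- how one segment following a '-' is rendered, decided by its first character (B's loop body)
def pyBSeg (p : List Char) : List Char :=
  match p with
  | [] => '_' :: []
  | n :: rest =>
    if PySem.Chars.isdigit n then ['N', 'e', 'g'] ++ (n :: rest)
    else if PySem.Chars.isalpha n then PySem.Chars.upper [n] ++ rest
    else '_' :: (n :: rest)

def replace_hyphens_py_alt (name : String) : String :=
  match PySem.Chars.splitOn name.toList ['-'] with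
  | [] => ""                                                   -- unreachable: split is never empty
  | first :: rest => String.ofList (PySem.Chars.join [] (first :: rest.map pyBSeg))

-- ===== PRECONDITION & SPEC =====
def Spec_replace_hyphens_py (name : String) (out : String) : Prop := out = replace_hyphens_py_alt name
instance (name : String) (out : String) : Decidable (Spec_replace_hyphens_py name out) := by unfold Spec_replace_hyphens_py; infer_instance

-- ===== CLAIM (what is proved, stated in full; the proofs are below) =====
def Claim_equal_replace_hyphens_py : Prop := ∀ (name : String), Dom_replace_hyphens_py name → Spec_replace_hyphens_py name (replace_hyphens_py name)

-- ===== LEMMAS AND PROOFS =====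

-- simple recursive characterisation of splitting on the single character '-'
def mySplit : List Char → List (List Char)
  | [] => [[]]
  | c :: rest => if c = '-' then [] :: mySplit rest
                 else match mySplit rest with
                      | [] => [[c]]
                      | f :: r => (c :: f) :: r

-- prepend chars onto the first piece
def consHead (p : List Char) (ps : List (List Char)) : List (List Char) :=
  match ps with
  | [] => [p]
  | f :: r => (p ++ f) :: r

-- B's whole output, as a function of the split pieces: first piece verbatim, each later piece through pyBSeg
def bCore (ps : List (List Char)) : List Char :=
  match ps with
  | [] => []
  | f :: r => f ++ (r.map pyBSeg).flatten

lemma mySplit_ne_nil (l : List Char) : mySplit l ≠ [] := by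
  cases l with
  | nil => simp [mySplit]
  | cons c rest =>
    simp only [mySplit]
    split_ifs with h
    · simp
    · cases hm : mySplit rest with
      | nil => simp
      | cons f r => simp

lemma go_spec : ∀ (fuel : Nat) (l cur : List Char) (hacc : List (List Char)),
    l.length < fuel →
    PySem.Chars.splitOn.go ['-'] fuel l cur hacc = hacc.reverse ++ consHead cur.reverse (mySplit l) := by
  intro fuel
  induction fuel with
  | zero => intro l cur hacc h; omega
  | succ n ih =>
    intro l cur hacc h
    cases l with
    | nil => simp [PySem.Chars.splitOn.go, mySplit, consHead]
    | cons c rest =>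
      by_cases hc : c = '-'
      · subst hc
        rw [PySem.Chars.splitOn.go]
        simp only [List.isPrefixOf, BEq.rfl, Bool.true_and, if_pos, List.length_cons,
          List.length_nil, List.drop_succ_cons, List.drop_zero, Nat.zero_add]
        rw [ih rest [] (List.reverse cur :: hacc) (by simp at h ⊢; omega)]
        simp [mySplit]
        cases hm : mySplit rest with
        | nil => exact absurd hm (mySplit_ne_nil rest)
        | cons f r => simp [consHead]
      · rw [PySem.Chars.splitOn.go]
        have hpre : List.isPrefixOf ['-'] (c :: rest) = false := by
          simp [List.isPrefixOf]; exact fun hh => absurd hh.symm hc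
        rw [hpre]
        simp only [Bool.false_eq_true, if_false]
        rw [ih rest (c :: cur) hacc (by simp at h ⊢; omega)]
        simp [mySplit, hc]
        cases hm : mySplit rest with
        | nil => exact absurd hm (mySplit_ne_nil rest)
        | cons f r => simp [consHead]

lemma splitOn_eq (l : List Char) : PySem.Chars.splitOn l ['-'] = mySplit l := by
  rw [PySem.Chars.splitOn, go_spec (l.length + 1) l [] [] (by omega)]
  cases hm : mySplit l with
  | nil => exact absurd hm (mySplit_ne_nil l)
  | cons f r => simp [consHead]

lemma main_lemma : ∀ (n : Nat) (l : List Char), l.length ≤ n →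
    (pyAGo l).flatten = bCore (mySplit l) := by
  intro n
  induction n with
  | zero =>
    intro l h
    have : l = [] := by cases l <;> simp_all
    subst this; simp [pyAGo, mySplit, bCore]
  | succ n ih =>
    intro l h
    cases l with
    | nil => simp [pyAGo, mySplit, bCore]
    | cons c rest =>
      by_cases hc : c = '-'
      · subst hc
        cases rest with
        | nil => simp [pyAGo, mySplit, bCore, pyBSeg]
        | cons m rest' =>
          by_cases hm : m = '-'
          · subst hm
            have hdg : PySem.Chars.isdigit '-' = false := by decide
            have hal : PySem.Chars.isalpha '-' = false := by decide
            rw [show pyAGo ('-' :: '-' :: rest') = ['_'] :: pyAGo ('-' :: rest') by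
                  simp [pyAGo, hdg, hal]]
            have hih := ih ('-' :: rest') (by simp at h ⊢; omega)
            simp only [mySplit, if_pos, bCore, List.map_cons, List.flatten_cons] at hih ⊢
            simp [pyBSeg, hih]
          · by_cases hd : PySem.Chars.isdigit m
            · rw [show pyAGo ('-' :: m :: rest') = ['N','e','g'] :: pyAGo (m :: rest') by
                    simp [pyAGo, hd]]
              have hih := ih (m :: rest') (by simp at h ⊢; omega)
              simp only [mySplit, bCore, List.flatten_cons, if_neg hm] at hih ⊢
              cases hs : mySplit rest' with
              | nil => exact absurd hs (mySplit_ne_nil rest')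
              | cons f r =>
                simp only [hs] at hih
                simp [pyBSeg, hd, hih]
            · by_cases ha : PySem.Chars.isalpha m
              · rw [show pyAGo ('-' :: m :: rest') = PySem.Chars.upper [m] :: pyAGo rest' by
                      simp [pyAGo, hd, ha]]
                have hih := ih rest' (by simp at h ⊢; omega)
                simp only [mySplit, bCore, List.flatten_cons, if_neg hm]
                cases hs : mySplit rest' with
                | nil => exact absurd hs (mySplit_ne_nil rest')
                | cons f r =>
                  simp only [hs, bCore] at hih
                  simp [pyBSeg, hd, ha, hih]
              · rw [show pyAGo ('-' :: m :: rest') = ['_'] :: pyAGo (m :: rest') by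
                      simp [pyAGo, hd, ha]]
                have hih := ih (m :: rest') (by simp at h ⊢; omega)
                simp only [mySplit, bCore, List.flatten_cons, if_neg hm] at hih ⊢
                cases hs : mySplit rest' with
                | nil => exact absurd hs (mySplit_ne_nil rest')
                | cons f r =>
                  simp only [hs] at hih
                  simp [pyBSeg, hd, ha, hih]
      · rw [show pyAGo (c :: rest) = [c] :: pyAGo rest by rw [pyAGo.eq_def]; simp [hc]]
        have hih := ih rest (by simp at h ⊢; omega)
        simp only [mySplit, if_neg hc]
        cases hs : mySplit rest with
        | nil => exact absurd hs (mySplit_ne_nil rest)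
        | cons f r =>
          simp only [hs, bCore] at hih ⊢
          simp [hih]

lemma join_nil_flatten (ps : List (List Char)) : PySem.Chars.join [] ps = ps.flatten := by
  induction ps with
  | nil => simp [PySem.Chars.join_nil]
  | cons f r ih =>
    cases r with
    | nil => simp [PySem.Chars.join_singleton]
    | cons q t =>
      rw [PySem.Chars.join_cons_cons]
      simp [ih]

lemma mySplit_no_hyphen (l : List Char) (h : '-' ∉ l) : mySplit l = [l] := by
  induction l with
  | nil => simp [mySplit]
  | cons c rest ih =>
    simp only [List.mem_cons, not_or] at h
    rw [mySplit, if_neg (by exact fun he => h.1 he.symm), ih h.2]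

lemma alt_eq_bCore (name : String) :
    replace_hyphens_py_alt name = String.ofList (bCore (mySplit name.toList)) := by
  rw [replace_hyphens_py_alt.eq_def, splitOn_eq]
  cases hs : mySplit name.toList with
  | nil => exact absurd hs (mySplit_ne_nil _)
  | cons f r => simp [join_nil_flatten, bCore]

-- ===== VERDICT (by name: the statement is the Claim_ definition above) =====
theorem replace_hyphens_py_spec : Claim_equal_replace_hyphens_py := by
  intro name _
  unfold Spec_replace_hyphens_py
  rw [replace_hyphens_py]
  split_ifs with hg
  · rcases hg with hg | hg
    · subst hg; rw [alt_eq_bCore]; rfl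
    · have hni : '-' ∉ name.toList := by
        have hiff := PySem.Str.isIn_iff_infix (sub := "-") (s := name)
        rw [hg] at hiff
        intro hmem
        have hinf : ("-".toList <:+: name.toList) := (List.singleton_infix_iff _ _).mpr hmem
        exact absurd (hiff.mpr hinf) (by simp)
      rw [alt_eq_bCore, mySplit_no_hyphen _ hni]
      simp [bCore]
  · rw [alt_eq_bCore, join_nil_flatten, main_lemma name.toList.length name.toList le_rfl]
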